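-- pv_equiv track=rewrite | github.com/suhassrivats/Data-Structures-And-Algorithms-Implementation | Problems/Recursions/CodingBat_recursion_2.py | groupSumClump
-- ===== SOURCE A (Python) =====
-- def groupSumClump(start, nums, target):
--     if start >= len(nums):
--         return target == 0
--     add = nums[start]
--
--     while(start < len(nums)-1 and nums[start] == nums[start+1]):
--         add += nums[start+1]
--         start += 1
--
--     notpicked = groupSumClump(start+1, nums, target-add)
--     picked = groupSumClump(start+1, nums, target)
--
--     return notpicked or picked
-- ===== SOURCE B (Python) =====
-- def _clumps(xs):
--     # collapse each maximal run of equal adjacent values into its sum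
--     if not xs:
--         return []
--     rest = _clumps(xs[1:])
--     if rest and xs[1] == xs[0]:
--         return [xs[0] + rest[0]] + rest[1:]
--     return [xs[0]] + rest
--
--
-- def groupSumClump(start, nums, target):
--     clumps = _clumps(nums[start:])
--     reach = {0}
--     for c in clumps:
--         reach |= {r + c for r in reach}
--     return target in reach
-- ===== Notes on version B (the rewrite author's own statement) =====
-- stated objective: alternative
-- what changed: Replaces the pick/skip recursion (with an in-recursion while-loop doing the clumping) by first collapsing adjacent-equal runs into a list of clump sums and then an iterative reachable-sums set DP, answering by membership of target.
-- outside the precondition, e.g. on groupSumClump(-1, [1], 1): A returns False, B returns True; on groupSumClump(-2, [3, 3], 6): A returns False, B returns True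
import Mathlib
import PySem

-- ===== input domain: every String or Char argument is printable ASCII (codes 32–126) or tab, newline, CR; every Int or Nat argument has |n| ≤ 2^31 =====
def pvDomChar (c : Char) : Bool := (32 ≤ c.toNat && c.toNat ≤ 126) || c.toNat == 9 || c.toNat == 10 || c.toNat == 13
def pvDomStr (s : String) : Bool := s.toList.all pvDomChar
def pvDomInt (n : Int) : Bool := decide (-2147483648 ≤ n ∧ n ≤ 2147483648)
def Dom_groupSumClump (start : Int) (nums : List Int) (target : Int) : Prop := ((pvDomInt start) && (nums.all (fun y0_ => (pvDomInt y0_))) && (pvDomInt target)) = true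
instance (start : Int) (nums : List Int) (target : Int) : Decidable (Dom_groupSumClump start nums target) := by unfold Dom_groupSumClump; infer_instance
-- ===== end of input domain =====

-- B collapses adjacent-equal runs into clump sums, then decides subset-sum by an iterative
-- reachable-sums set instead of A's pick/skip recursion (objective: alternative).

-- ===== PORT A =====
-- the while-loop of A: while start < len(nums)-1 and nums[start] == nums[start+1]: add += nums[start+1]; start += 1
-- (fuel only makes the recursion structural; with the fuel supplied below it never runs out while the
--  Python loop runs.  pyGetD's default 0 is never used under Pre_: the guard keeps the index in range.)
def pvClumpA (nums : List Int) : Nat → Int → Int → Int × Int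
  | 0, start, add => (start, add)
  | fuel + 1, start, add =>
    if start < (nums.length : Int) - 1 ∧ PySem.List.pyGet? nums start = PySem.List.pyGet? nums (start + 1) then
      pvClumpA nums fuel (start + 1) (add + PySem.List.pyGetD nums (start + 1) 0)
    else (start, add)

def pvGSC (nums : List Int) : Nat → Int → Int → Bool
  | 0, _, target => target == 0
  | fuel + 1, start, target =>
    if (nums.length : Int) ≤ start then target == 0
    else
      let p := pvClumpA nums nums.length start (PySem.List.pyGetD nums start 0)
      pvGSC nums fuel (p.1 + 1) (target - p.2) || pvGSC nums fuel (p.1 + 1) target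

def groupSumClump (start : Int) (nums : List Int) (target : Int) : Bool :=
  pvGSC nums (nums.length + 1) start target

-- ===== PORT B =====
-- helper _clumps: collapse each maximal run of equal adjacent values into its sum
def pvClumps : List Int → List Int
  | [] => []
  | x :: xs =>
    match pvClumps xs with
    | [] => [x]
    | r :: rs => if xs.head? = some x then (x + r) :: rs else x :: r :: rs

-- one step of the loop: reach |= {r + c for r in reach}
def pvStep (S : PySem.Set Int) (c : Int) : PySem.Set Int :=
  PySem.Set.union S (PySem.Set.ofList (S.map (fun r => r + c)))

def groupSumClump_alt (start : Int) (nums : List Int) (target : Int) : Bool :=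
  let clumps := pvClumps (PySem.List.slice nums (some start) none)
  let reach := clumps.foldl pvStep (PySem.Set.ofList [0])
  PySem.Set.contains reach target

-- ===== PRECONDITION & SPEC =====
-- Pre_ restricts start to the natural domain 0 ≤ start of this recursion index: for start < -len(nums)
-- A raises IndexError, and for -len(nums) ≤ start < 0 A's value comes from Python negative-index
-- wraparound (clumping across the end of the list), which B does not mimic (B uses slice semantics there).
def Pre_groupSumClump (start : Int) (nums : List Int) (target : Int) : Prop := 0 ≤ start
instance (start : Int) (nums : List Int) (target : Int) : Decidable (Pre_groupSumClump start nums target) := by unfold Pre_groupSumClump; infer_instance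

def pvWitness_groupSumClump : Int × List Int × Int := (0, [2, 4, 4, 8], 10)

def Spec_groupSumClump (start : Int) (nums : List Int) (target : Int) (out : Bool) : Prop := out = groupSumClump_alt start nums target
instance (start : Int) (nums : List Int) (target : Int) (out : Bool) : Decidable (Spec_groupSumClump start nums target out) := by unfold Spec_groupSumClump; infer_instance

-- ===== CLAIM (what is proved, stated in full; the proofs are below) =====
def Claim_equal_groupSumClump : Prop := ∀ (start : Int) (nums : List Int) (target : Int), Dom_groupSumClump start nums target → Pre_groupSumClump start nums target → Spec_groupSumClump start nums target (groupSumClump start nums target)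

-- ===== LEMMAS AND PROOFS =====

-- length of the maximal prefix of equal-to-v elements, and its sum
def pvRunLen (v : Int) : List Int → Nat
  | [] => 0
  | y :: ys => if y = v then pvRunLen v ys + 1 else 0

def pvRunSum (v : Int) : List Int → Int
  | [] => 0
  | y :: ys => if y = v then y + pvRunSum v ys else 0

-- the common reference semantics: subset-sum over a list of clump sums
def pvSubsum : List Int → Int → Bool
  | [], t => t == 0
  | c :: cs, t => pvSubsum cs (t - c) || pvSubsum cs t

theorem pvClumps_cons (x : Int) (xs : List Int) :
    pvClumps (x :: xs) = (x + pvRunSum x xs) :: pvClumps (xs.drop (pvRunLen x xs)) := by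
  induction xs generalizing x with
  | nil => simp [pvClumps, pvRunSum, pvRunLen]
  | cons y ys ih =>
    rw [show pvClumps (x :: y :: ys) = (match pvClumps (y :: ys) with
          | [] => [x]
          | r :: rs => if (y :: ys).head? = some x then (x + r) :: rs else x :: r :: rs) from rfl,
        ih y]
    by_cases hxy : y = x
    · subst hxy
      simp [pvRunSum, pvRunLen]
    · simp [pvRunSum, pvRunLen, hxy, ← ih y]

theorem pvClumpA_eq (tl : List Int) : ∀ (nums : List Int) (fuel : Nat) (start acc v : Int),
    0 ≤ start → tl.length ≤ fuel →
    PySem.List.pyGet? nums start = some v → nums.drop (start.toNat + 1) = tl →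
    pvClumpA nums fuel start acc = (start + (pvRunLen v tl : Int), acc + pvRunSum v tl) := by
  induction tl with
  | nil =>
    intro nums fuel start acc v h0 hf hg hd
    have hlen : nums.length ≤ start.toNat + 1 := by
      have := List.drop_eq_nil_iff.mp hd; omega
    cases fuel with
    | zero => simp [pvClumpA, pvRunLen, pvRunSum]
    | succ fuel =>
      rw [pvClumpA, if_neg (by rintro ⟨h1, -⟩; omega)]
      simp [pvRunLen, pvRunSum]
  | cons y ys ih =>
    intro nums fuel start acc v h0 hf hg hd
    obtain ⟨fuel, rfl⟩ : ∃ f, fuel = f + 1 := by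
      cases fuel with
      | zero => simp at hf
      | succ f => exact ⟨f, rfl⟩
    have hl := congrArg List.length hd
    simp only [List.length_drop, List.length_cons] at hl
    have h1 : start.toNat + 1 < nums.length := by omega
    have hy : nums[start.toNat + 1]? = some y := by
      have h2 : (nums.drop (start.toNat + 1))[0]? = nums[start.toNat + 1 + 0]? :=
        List.getElem?_drop ..
      rw [hd] at h2; simpa using h2.symm
    have hg1 : PySem.List.pyGet? nums (start + 1) = some y := by
      rw [show start + 1 = ((start.toNat + 1 : Nat) : Int) by omega, PySem.List.pyGet?_natCast]
      exact hy
    have hd1 : nums.drop ((start + 1).toNat + 1) = ys := by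
      have h3 : nums.drop ((start + 1).toNat + 1) = (nums.drop (start.toNat + 1)).drop 1 := by
        rw [List.drop_drop]; congr 1; omega
      rw [h3, hd]; rfl
    rw [pvClumpA]
    by_cases hxy : y = v
    · subst hxy
      rw [if_pos ⟨by omega, by rw [hg, hg1]⟩]
      have hgd : PySem.List.pyGetD nums (start + 1) 0 = y := by
        rw [show start + 1 = ((start.toNat + 1 : Nat) : Int) by omega, PySem.List.pyGetD_natCast]
        simp [List.getD, hy]
      rw [hgd, ih nums fuel (start + 1) (acc + y) y (by omega) (by simp at hf ⊢; omega) hg1 hd1]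
      simp only [pvRunLen, pvRunSum, if_true, Prod.mk.injEq]
      constructor
      · push_cast; ring
      · ring
    · rw [if_neg (by rintro ⟨-, he⟩; rw [hg, hg1] at he; exact hxy (Option.some.injEq .. ▸ he).symm)]
      simp [pvRunLen, pvRunSum, hxy]

theorem pvGSC_eq (fuel : Nat) : ∀ (nums : List Int) (start target : Int), 0 ≤ start →
    nums.length ≤ start.toNat + fuel →
    pvGSC nums fuel start target = pvSubsum (pvClumps (nums.drop start.toNat)) target := by
  induction fuel with
  | zero =>
    intro nums start target h0 hk
    rw [List.drop_eq_nil_of_le (by omega)]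
    simp [pvGSC, pvClumps, pvSubsum]
  | succ fuel ih =>
    intro nums start target h0 hk
    by_cases hend : (nums.length : Int) ≤ start
    · rw [pvGSC, if_pos hend, List.drop_eq_nil_of_le (by omega)]
      simp [pvClumps, pvSubsum]
    · have h1 : start.toNat < nums.length := by omega
      obtain ⟨x, hx⟩ : ∃ x, nums[start.toNat]? = some x :=
        ⟨nums[start.toNat], List.getElem?_eq_getElem h1⟩
      obtain ⟨hlt, hxe⟩ := List.getElem?_eq_some_iff.mp hx
      have hdrop : nums.drop start.toNat = x :: nums.drop (start.toNat + 1) := by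
        have hcd := List.getElem_cons_drop (as := nums) (i := start.toNat) h1
        rw [hxe] at hcd; exact hcd.symm
      have hg : PySem.List.pyGet? nums start = some x := by
        rw [show start = ((start.toNat : Nat) : Int) by omega, PySem.List.pyGet?_natCast]; exact hx
      have hgd : PySem.List.pyGetD nums start 0 = x := by
        rw [show start = ((start.toNat : Nat) : Int) by omega, PySem.List.pyGetD_natCast]
        simp [List.getD, hx]
      have hclump := pvClumpA_eq (nums.drop (start.toNat + 1)) nums nums.length start x x h0
        (by simp) hg rfl
      rw [pvGSC, if_neg hend]
      simp only [hgd, hclump]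
      have hst : nums.drop ((start + (pvRunLen x (nums.drop (start.toNat + 1)) : Int) + 1).toNat)
          = (nums.drop (start.toNat + 1)).drop (pvRunLen x (nums.drop (start.toNat + 1))) := by
        rw [List.drop_drop]; congr 1; omega
      rw [ih nums _ _ (by omega) (by omega), ih nums _ _ (by omega) (by omega), hst, hdrop,
        pvClumps_cons]
      rfl

theorem pvReach_mem (cs : List Int) : ∀ (S : List Int) (t : Int),
    t ∈ cs.foldl pvStep S ↔ ∃ s ∈ S, pvSubsum cs (t - s) = true := by
  induction cs with
  | nil =>
    intro S t
    simp only [List.foldl_nil, pvSubsum]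
    constructor
    · intro h; exact ⟨t, h, by simp⟩
    · rintro ⟨s, hs, he⟩
      have : t - s = 0 := by simpa using he
      have : t = s := by omega
      rwa [this]
  | cons c cs ih =>
    intro S t
    rw [List.foldl_cons, ih]
    have hmem : ∀ u : Int, u ∈ pvStep S c ↔ u ∈ S ∨ ∃ r ∈ S, u = r + c := by
      intro u
      simp [pvStep, PySem.Set.mem_union, PySem.Set.mem_ofList, List.mem_map, eq_comm]
    constructor
    · rintro ⟨s, hs, he⟩
      rcases (hmem s).mp hs with h | ⟨r, hr, rfl⟩
      · exact ⟨s, h, by simp [pvSubsum, he]⟩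
      · refine ⟨r, hr, ?_⟩
        simp only [pvSubsum, Bool.or_eq_true]
        left
        rwa [show t - r - c = t - (r + c) by ring]
    · rintro ⟨s, hs, he⟩
      simp only [pvSubsum, Bool.or_eq_true] at he
      rcases he with he | he
      · exact ⟨s + c, (hmem (s + c)).mpr (Or.inr ⟨s, hs, rfl⟩),
          by rwa [show t - (s + c) = t - s - c by ring]⟩
      · exact ⟨s, (hmem s).mpr (Or.inl hs), he⟩

theorem pvB_eq (nums : List Int) (start target : Int) (h : 0 ≤ start) :
    groupSumClump_alt start nums target = pvSubsum (pvClumps (nums.drop start.toNat)) target := by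
  unfold groupSumClump_alt
  rw [PySem.List.slice_from nums h, Bool.eq_iff_iff, PySem.Set.contains_iff,
    pvReach_mem (pvClumps (nums.drop start.toNat)) (PySem.Set.ofList [0]) target]
  constructor
  · rintro ⟨s, hs, he⟩
    have : s = 0 := by simpa [PySem.Set.mem_ofList] using hs
    subst this; simpa using he
  · intro he
    exact ⟨0, by simp [PySem.Set.mem_ofList], by simpa using he⟩

-- ===== VERDICT (by name: the statement is the Claim_ definition above) =====
theorem groupSumClump_spec : Claim_equal_groupSumClump := by
  intro start nums target _ hpre
  unfold Spec_groupSumClump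
  unfold groupSumClump
  rw [pvGSC_eq (nums.length + 1) nums start target hpre (by omega), pvB_eq nums start target hpre]
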